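-- pv_equiv track=rewrite | github.com/martinhjel/NordicNuclearAnalysis | Archive/ARCHIVED_functions.py | get_time_steps_for_period
-- ===== SOURCE A (Python) =====
-- def get_time_steps_for_period(start_year, end_year):
--     """
--     Given a start and end year, return the corresponding min and max time step indices.
--
--     Parameters:
--     start_year (int): The starting year of the period (between 1991 and 2020).
--     end_year (int): The ending year of the period (between 1991 and 2020).
--
--     # Example usage:
--     timeMaxMin_YEAR = get_time_steps_for_period(2000, 2000)
--
--     Returns:
--     list: [min_time_step, max_time_step]
--     """
--     # Define the valid range
--     first_year = 1991
--     last_year = 2020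
--
--     # Leap years that have 8,784 hours instead of 8,760
--     leap_years = {1992, 1996, 2000, 2004, 2008, 2012, 2016, 2020}
--
--     # Validate input years
--     if start_year < first_year or end_year > last_year or start_year > end_year:
--         raise ValueError(f"Years must be between {first_year} and {last_year}, with start_year ≤ end_year")
--
--     # Compute min time step (start of start_year)
--     min_time_step = 0
--     for y in range(first_year, start_year):
--         min_time_step += 8784 if y in leap_years else 8760
--
--     # Compute max time step (end of end_year)
--     max_time_step = min_time_step  # Start at the min time step
--     for y in range(start_year, end_year + 1):  # Include the last year
--         max_time_step += 8784 if y in leap_years else 8760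
--
--     return [min_time_step, max_time_step - 1]  # -1 to get the last valid index
-- ===== SOURCE B (Python) =====
-- def get_time_steps_for_period(start_year, end_year):
--     first_year = 1991
--     last_year = 2020
--     if start_year < first_year or end_year > last_year or start_year > end_year:
--         raise ValueError(f"Years must be between {first_year} and {last_year}, with start_year ≤ end_year")
--     # leap years in 1991..2020 are exactly the multiples of 4; count those strictly below y
--     def leaps_before(y):
--         return max(0, (y - 1) // 4 - 497)
--     min_time_step = 8760 * (start_year - 1991) + 24 * leaps_before(start_year)
--     max_time_step = 8760 * (end_year + 1 - 1991) + 24 * leaps_before(end_year + 1) - 1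
--     return [min_time_step, max_time_step]
-- ===== Notes on version B (the rewrite author's own statement) =====
-- stated objective: simpler
-- what changed: Replaces the two year-by-year accumulation loops with a closed-form computation: hours = 8760*(years elapsed since 1991) + 24*(count of leap years, i.e. multiples of 4, strictly below the year).
import Mathlib
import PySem

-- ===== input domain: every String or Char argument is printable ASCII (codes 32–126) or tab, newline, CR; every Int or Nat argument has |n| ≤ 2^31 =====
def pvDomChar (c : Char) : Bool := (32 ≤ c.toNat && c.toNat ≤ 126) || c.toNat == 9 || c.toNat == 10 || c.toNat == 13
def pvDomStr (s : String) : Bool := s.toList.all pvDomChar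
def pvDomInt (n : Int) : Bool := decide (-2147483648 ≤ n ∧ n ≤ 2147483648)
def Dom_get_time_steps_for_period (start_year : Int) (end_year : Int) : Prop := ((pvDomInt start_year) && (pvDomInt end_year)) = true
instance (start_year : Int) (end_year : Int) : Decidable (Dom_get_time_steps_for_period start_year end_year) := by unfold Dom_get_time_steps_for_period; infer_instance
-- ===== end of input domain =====

-- B replaces A's two year-by-year accumulation loops with a closed-form hour count (simpler).


-- ===== PORT A =====
def pvLeapYears : List Int := [1992, 1996, 2000, 2004, 2008, 2012, 2016, 2020]

def get_time_steps_for_period (start_year : Int) (end_year : Int) : List Int :=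
  if start_year < 1991 ∨ end_year > 2020 ∨ start_year > end_year then
    []  -- Python raises ValueError here; excluded by Pre_
  else
    let min_time_step :=
      (PySem.List.pyRange 1991 start_year 1).foldl
        (fun acc y => acc + (if pvLeapYears.contains y then 8784 else 8760)) 0
    let max_time_step :=
      (PySem.List.pyRange start_year (end_year + 1) 1).foldl
        (fun acc y => acc + (if pvLeapYears.contains y then 8784 else 8760)) min_time_step
    [min_time_step, max_time_step - 1]

-- ===== PORT B =====
def pvLeapsBefore (y : Int) : Int := max 0 (PySem.Int.floordiv (y - 1) 4 - 497)

def get_time_steps_for_period_alt (start_year : Int) (end_year : Int) : List Int :=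
  if start_year < 1991 ∨ end_year > 2020 ∨ start_year > end_year then
    []  -- Python raises ValueError here; excluded by Pre_
  else
    let min_time_step := 8760 * (start_year - 1991) + 24 * pvLeapsBefore start_year
    let max_time_step := 8760 * (end_year + 1 - 1991) + 24 * pvLeapsBefore (end_year + 1) - 1
    [min_time_step, max_time_step]

-- ===== PRECONDITION & SPEC =====
-- Pre_ excludes exactly the inputs on which A raises ValueError (its validation guard).
def Pre_get_time_steps_for_period (start_year : Int) (end_year : Int) : Prop :=
  1991 ≤ start_year ∧ end_year ≤ 2020 ∧ start_year ≤ end_year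
instance (start_year : Int) (end_year : Int) : Decidable (Pre_get_time_steps_for_period start_year end_year) := by unfold Pre_get_time_steps_for_period; infer_instance

def pvWitness_get_time_steps_for_period : Int × Int := (2000, 2000)

def Spec_get_time_steps_for_period (start_year : Int) (end_year : Int) (out : List Int) : Prop := out = get_time_steps_for_period_alt start_year end_year
instance (start_year : Int) (end_year : Int) (out : List Int) : Decidable (Spec_get_time_steps_for_period start_year end_year out) := by unfold Spec_get_time_steps_for_period; infer_instance

-- ===== CLAIM (what is proved, stated in full; the proofs are below) =====
def Claim_equal_get_time_steps_for_period : Prop := ∀ (start_year : Int) (end_year : Int), Dom_get_time_steps_for_period start_year end_year → Pre_get_time_steps_for_period start_year end_year → Spec_get_time_steps_for_period start_year end_year (get_time_steps_for_period start_year end_year)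

-- ===== LEMMAS AND PROOFS =====

-- ===== VERDICT (by name: the statement is the Claim_ definition above) =====
theorem get_time_steps_for_period_spec : Claim_equal_get_time_steps_for_period := by
  intro s e _ hpre
  obtain ⟨h1, h2, h3⟩ := hpre
  have hs : s ≤ 2020 := le_trans h3 h2
  have he : 1991 ≤ e := le_trans h1 h3
  unfold Spec_get_time_steps_for_period
  interval_cases s <;> interval_cases e <;> decide
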